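-- pv_equiv track=rewrite | github.com/chplushsieh/carvana-challenge | util/tile.py | group_tile_names
-- ===== SOURCE A (Python) =====
-- def get_img_name(tile_name):
--     '''
--     get whole image name from tile name
--     '''
--     return tile_name.split('-')[0]
--
-- def group_tile_names(tile_names):
--     '''
--     input:
--       tile_names: a list of strings, tile names of all images
--     output:
--       tiles_by_imgs: a dict with image names as keys and tile names of a image as values
--     '''
--
--     tiles_by_imgs = {}
--
--     for tile_name in tile_names:
--         img_name = get_img_name(tile_name)
--
--         if img_name not in tiles_by_imgs:
--             tiles_by_imgs[img_name] = [tile_name]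
--         else:
--             tiles_by_imgs[img_name].append(tile_name)
--     return tiles_by_imgs
-- ===== SOURCE B (Python) =====
-- def get_img_name(tile_name):
--     '''
--     get whole image name from tile name
--     '''
--     return tile_name.split('-')[0]
--
-- def group_tile_names(tile_names):
--     keys = dict.fromkeys(map(get_img_name, tile_names))
--     return {k: [t for t in tile_names if get_img_name(t) == k] for k in keys}
-- ===== Notes on version B (the rewrite author's own statement) =====
-- stated objective: idiomatic
-- what changed: B replaces A's single mutate-as-you-go dict loop (insert-or-append per tile) by a two-phase comprehension: first dedup the image names in first-occurrence order with dict.fromkeys, then build each group in one filtering pass per key.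
import Mathlib
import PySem

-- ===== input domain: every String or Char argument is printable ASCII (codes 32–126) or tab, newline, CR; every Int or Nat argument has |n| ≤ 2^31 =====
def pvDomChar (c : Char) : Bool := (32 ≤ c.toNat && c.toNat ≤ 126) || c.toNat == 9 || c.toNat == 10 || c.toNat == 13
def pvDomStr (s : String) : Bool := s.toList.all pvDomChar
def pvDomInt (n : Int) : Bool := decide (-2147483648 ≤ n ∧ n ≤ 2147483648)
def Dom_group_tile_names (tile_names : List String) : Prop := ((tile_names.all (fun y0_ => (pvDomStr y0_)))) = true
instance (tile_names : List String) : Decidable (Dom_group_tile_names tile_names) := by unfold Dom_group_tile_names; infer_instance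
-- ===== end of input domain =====

-- B groups tiles by image name with a dedup-keys-then-filter-per-key comprehension instead of A's
-- mutate-as-you-go dict loop (objective: idiomatic; same return value, no side effects in either).

-- ===== PORT A =====
-- shared helper of both Python versions: tile_name.split('-')[0]
def get_img_name (tile_name : String) : String :=
  PySem.List.pyGetD ((PySem.Str.split? tile_name "-").getD []) 0 ""   -- split('-') is never empty, so [0] never raises

def group_tile_names (tile_names : List String) : List (String × List String) :=
  (tile_names.foldl
    (fun tiles_by_imgs tile_name =>
      let img_name := get_img_name tile_name
      if tiles_by_imgs.contains img_name = false then
        tiles_by_imgs.insert img_name [tile_name]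
      else
        -- d[img_name].append(tile_name): key is present, so modify with default [] is exact
        tiles_by_imgs.modify img_name [] (fun v => v ++ [tile_name]))
    PySem.Dict.empty).items

-- ===== PORT B =====
def group_tile_names_alt (tile_names : List String) : List (String × List String) :=
  let keys := PySem.List.dedup (tile_names.map get_img_name)   -- dict.fromkeys: first occurrences, in order
  keys.map (fun k => (k, tile_names.filter (fun t => get_img_name t == k)))

-- ===== PRECONDITION & SPEC =====
def Spec_group_tile_names (tile_names : List String) (out : List (String × List String)) : Prop := out = group_tile_names_alt tile_names
instance (tile_names : List String) (out : List (String × List String)) : Decidable (Spec_group_tile_names tile_names out) := by unfold Spec_group_tile_names; infer_instance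

-- ===== CLAIM (what is proved, stated in full; the proofs are below) =====
def Claim_equal_group_tile_names : Prop := ∀ (tile_names : List String), Dom_group_tile_names tile_names → Spec_group_tile_names tile_names (group_tile_names tile_names)

-- ===== LEMMAS AND PROOFS =====

-- A's insert-or-append branch is, in both cases, d[k] = d.get(k, []) + [t]
theorem stepA_eq_modify (d : PySem.Dict String (List String)) (t : String) :
    (if d.contains (get_img_name t) = false then d.insert (get_img_name t) [t]
     else d.modify (get_img_name t) [] (fun v => v ++ [t]))
    = d.modify (get_img_name t) [] (fun v => v ++ [t]) := by
  by_cases h : d.contains (get_img_name t) = false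
  · simp [h, PySem.Dict.modify, PySem.Dict.getD_of_not_contains d _ h]
  · simp [h]

theorem group_tile_names_eq_alt (tile_names : List String) :
    group_tile_names tile_names = group_tile_names_alt tile_names := by
  unfold group_tile_names group_tile_names_alt
  have hstep : tile_names.foldl
      (fun d t =>
        let img_name := get_img_name t
        if d.contains img_name = false then d.insert img_name [t]
        else d.modify img_name [] (fun v => v ++ [t]))
      PySem.Dict.empty
      = tile_names.foldl (fun d t => d.modify (get_img_name t) [] (fun v => v ++ [t]))
          PySem.Dict.empty := by
    congr 1
    funext d t
    exact stepA_eq_modify d t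
  rw [hstep]
  set D := tile_names.foldl (fun d t => d.modify (get_img_name t) [] (fun v => v ++ [t]))
      PySem.Dict.empty with hD
  have hnd : D.keys.Nodup := by
    rw [hD]
    exact PySem.Dict.nodup_keys_foldl_modify_key tile_names get_img_name []
      (fun _ t => fun v => v ++ [t]) PySem.Dict.empty PySem.Dict.nodup_keys_empty
  have hkeys : D.keys = PySem.List.dedup (tile_names.map get_img_name) := by
    rw [hD, PySem.Dict.keys_foldl_modify_key tile_names get_img_name []
      (fun _ t => fun v => v ++ [t]) PySem.Dict.empty]
    simp [PySem.Dict.keys_empty, PySem.Set.update_nil_left]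
  have hgetD : ∀ k, D.getD k [] = tile_names.filter (fun t => get_img_name t == k) := by
    intro k
    have hfold : D = (tile_names.map (fun t => (get_img_name t, t))).foldl
        (fun d p => d.modify p.1 [] (fun v => v ++ [p.2])) PySem.Dict.empty := by
      rw [hD, List.foldl_map]
    rw [hfold, PySem.Dict.getD_foldl_modify_append, PySem.Dict.getD_empty]
    rw [List.filter_map]
    simp [Function.comp_def]
  rw [PySem.Dict.items_eq_map_keys D hnd [], hkeys]
  exact List.map_congr_left (fun k _ => by rw [hgetD k])

-- ===== VERDICT (by name: the statement is the Claim_ definition above) =====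
theorem group_tile_names_spec : Claim_equal_group_tile_names := by
  intro tile_names _
  unfold Spec_group_tile_names
  exact group_tile_names_eq_alt tile_names
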